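-- pv_equiv track=rewrite | github.com/Haris757518/AI-Morse-Decoder | secure_core.py | morse_to_signal
-- ===== SOURCE A (Python) =====
-- def morse_to_signal(morse_code: str, base_unit: int = 100):
--     signal = []
--     words = morse_code.split(' / ')
--     for wi, word in enumerate(words):
--         letters = word.split(' ')
--         for li, letter in enumerate(letters):
--             for ci, char in enumerate(letter):
--                 dur = base_unit if char == '.' else 3 * base_unit
--                 signal.append(('on', dur))
--                 if ci < len(letter) - 1:
--                     signal.append(('off', base_unit))
--             if li < len(letters) - 1:
--                 signal.append(('off', 3 * base_unit))
--             elif wi < len(words) - 1: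
--                 signal.append(('off', 7 * base_unit))
--     return signal
-- ===== SOURCE B (Python) =====
-- def morse_to_signal(morse_code: str, base_unit: int = 100):
--     def join(parts, sep):
--         if not parts:
--             return []
--         out = list(parts[0])
--         for p in parts[1:]:
--             out += sep
--             out += p
--         return out
--
--     def letter_sig(letter):
--         return join([[('on', base_unit if c == '.' else 3 * base_unit)] for c in letter],
--                     [('off', base_unit)])
--
--     def word_sig(word):
--         return join([letter_sig(l) for l in word.split(' ')], [('off', 3 * base_unit)])
--
--     return join([word_sig(w) for w in morse_code.split(' / ')], [('off', 7 * base_unit)])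
-- ===== Notes on version B (the rewrite author's own statement) =====
-- stated objective: simpler
-- what changed: B composes the signal compositionally: per-letter and per-word sublists joined with constant separator lists, replacing A's nested index-enumerating loops with positional if/elif gap comparisons.
import Mathlib
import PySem

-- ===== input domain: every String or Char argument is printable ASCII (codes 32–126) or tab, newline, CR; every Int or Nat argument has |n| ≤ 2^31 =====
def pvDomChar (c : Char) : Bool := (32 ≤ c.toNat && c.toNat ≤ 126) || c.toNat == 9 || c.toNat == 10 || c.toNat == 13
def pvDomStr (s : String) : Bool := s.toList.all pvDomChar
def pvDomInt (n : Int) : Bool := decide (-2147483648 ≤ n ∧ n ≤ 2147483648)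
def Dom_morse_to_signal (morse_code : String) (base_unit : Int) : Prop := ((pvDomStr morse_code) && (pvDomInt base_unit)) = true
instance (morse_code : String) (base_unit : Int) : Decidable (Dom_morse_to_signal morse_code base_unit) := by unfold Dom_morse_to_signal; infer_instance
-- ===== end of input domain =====

-- B rebuilds the signal by joining per-letter/per-word sublists with constant separator lists
-- instead of A's positional index comparisons inside nested loops (objective: simpler decomposition).


-- ===== PORT A =====
-- inner char loop body: append the 'on' pulse, then an intra-letter gap unless last char (n = letter length)
def pvCharStep (u n : Int) (sig : List (String × Int)) (p : Int × Char) : List (String × Int) :=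
  let dur := if p.2 = '.' then u else 3 * u
  let sig := sig ++ [("on", dur)]
  if p.1 < n - 1 then sig ++ [("off", u)] else sig

-- per-letter body: run the char loop, then letter gap / word gap by index comparison
def pvLetterStep (u nw wi nl : Int) (sig : List (String × Int)) (p : Int × List Char) : List (String × Int) :=
  let letter := p.2
  let sig := (PySem.List.enumerate letter).foldl (pvCharStep u (letter.length : Int)) sig
  if p.1 < nl - 1 then sig ++ [("off", 3 * u)]
  else if wi < nw - 1 then sig ++ [("off", 7 * u)] else sig

-- per-word body: split into letters and run the letter loop
def pvWordStep (u nw : Int) (sig : List (String × Int)) (p : Int × List Char) : List (String × Int) :=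
  let letters := PySem.Chars.splitOn p.2 [' ']
  (PySem.List.enumerate letters).foldl (pvLetterStep u nw p.1 (letters.length : Int)) sig

def morse_to_signal (morse_code : String) (base_unit : Int) : List (String × Int) :=
  let words := PySem.Chars.splitOn morse_code.toList [' ', '/', ' ']
  (PySem.List.enumerate words).foldl (pvWordStep base_unit (words.length : Int)) []

-- ===== PORT B =====
-- join sublists with a separator between every adjacent pair (Source B's `join` loop)
def pvJoin (parts : List (List (String × Int))) (sep : List (String × Int)) : List (String × Int) :=
  match parts with
  | [] => []
  | p :: ps => ps.foldl (fun out q => out ++ sep ++ q) p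

def pvLetterSig (u : Int) (letter : List Char) : List (String × Int) :=
  pvJoin (letter.map (fun c => [("on", if c = '.' then u else 3 * u)])) [("off", u)]

def pvWordSig (u : Int) (word : List Char) : List (String × Int) :=
  pvJoin ((PySem.Chars.splitOn word [' ']).map (pvLetterSig u)) [("off", 3 * u)]

def morse_to_signal_alt (morse_code : String) (base_unit : Int) : List (String × Int) :=
  pvJoin ((PySem.Chars.splitOn morse_code.toList [' ', '/', ' ']).map (pvWordSig base_unit)) [("off", 7 * base_unit)]

-- ===== PRECONDITION & SPEC =====
def Spec_morse_to_signal (morse_code : String) (base_unit : Int) (out : List (String × Int)) : Prop := out = morse_to_signal_alt morse_code base_unit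
instance (morse_code : String) (base_unit : Int) (out : List (String × Int)) : Decidable (Spec_morse_to_signal morse_code base_unit out) := by unfold Spec_morse_to_signal; infer_instance

-- ===== CLAIM (what is proved, stated in full; the proofs are below) =====
def Claim_equal_morse_to_signal : Prop := ∀ (morse_code : String) (base_unit : Int), Dom_morse_to_signal morse_code base_unit → Spec_morse_to_signal morse_code base_unit (morse_to_signal morse_code base_unit)

-- ===== LEMMAS AND PROOFS =====

-- closed form of pvJoin: head ++ flatMap of (sep ++ ·) over the tail
def pvFlatJoin (sep : List (String × Int)) : List (List (String × Int)) → List (String × Int)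
  | [] => []
  | p :: ps => p ++ ps.flatMap (fun q => sep ++ q)

lemma pvJoin_eq (parts : List (List (String × Int))) (sep : List (String × Int)) :
    pvJoin parts sep = pvFlatJoin sep parts := by
  cases parts with
  | nil => rfl
  | cons p ps => simp [pvJoin, pvFlatJoin, List.flatMap]

lemma splitOn_go_ne_nil (sep : List Char) :
    ∀ (fuel : Nat) (l cur : List Char) (acc : List (List Char)),
      PySem.Chars.splitOn.go sep fuel l cur acc ≠ [] := by
  intro fuel
  induction fuel with
  | zero => intro l cur acc; simp [PySem.Chars.splitOn.go]
  | succ n ih =>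
    intro l cur acc
    cases l with
    | nil => simp [PySem.Chars.splitOn.go]
    | cons c rest =>
      rw [PySem.Chars.splitOn.go]
      split
      · exact ih _ _ _
      · exact ih _ _ _

lemma splitOn_ne_nil (s sep : List Char) : PySem.Chars.splitOn s sep ≠ [] :=
  splitOn_go_ne_nil sep _ s [] []

-- the char loop of A produces exactly B's per-letter signal, appended to the accumulator
lemma charLoop (u : Int) (xs : List Char) :
    ∀ (s : Int) (sig : List (String × Int)), s + (xs.length : Int) = (n : Int) →
      (PySem.List.enumerate xs s).foldl (pvCharStep u n) sig
        = sig ++ pvFlatJoin [("off", u)] (xs.map (fun c => [("on", if c = '.' then u else 3 * u)])) := by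
  induction xs with
  | nil => intro s sig _; simp [PySem.List.enumerate, pvFlatJoin]
  | cons c rest ih =>
    intro s sig h
    rw [PySem.List.enumerate_cons]
    simp only [List.foldl_cons]
    cases rest with
    | nil =>
      have hc : ¬ (s < n - 1) := by simp at h; omega
      simp [pvCharStep, hc, PySem.List.enumerate, pvFlatJoin]
    | cons r rs =>
      have hc : s < n - 1 := by simp only [List.length_cons] at h; push_cast at h; omega
      have h' : (s + 1) + (((r :: rs).length : Nat) : Int) = n := by
        simp only [List.length_cons] at h ⊢; push_cast at h ⊢; omega
      rw [show pvCharStep u n sig (s, c)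
            = sig ++ [("on", if c = '.' then u else 3 * u)] ++ [("off", u)] by
          simp [pvCharStep, hc]]
      rw [ih (s + 1) _ h']
      simp [pvFlatJoin, List.flatMap_cons, List.append_assoc]

-- the letter loop of A produces B's word signal plus the trailing word gap when wi < nw - 1
lemma letterLoop (u nw wi : Int) (xs : List (List Char)) :
    ∀ (s : Int) (sig : List (String × Int)), s + (xs.length : Int) = (nl : Int) → xs ≠ [] →
      (PySem.List.enumerate xs s).foldl (pvLetterStep u nw wi nl) sig
        = sig ++ pvFlatJoin [("off", 3 * u)] (xs.map (pvLetterSig u))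
              ++ (if wi < nw - 1 then [("off", 7 * u)] else []) := by
  induction xs with
  | nil => intro _ _ _ hne; exact absurd rfl hne
  | cons x rest ih =>
    intro s sig h _
    rw [PySem.List.enumerate_cons]
    simp only [List.foldl_cons]
    have hx := charLoop (n := (x.length : Int)) u x 0 sig (by simp)
    cases rest with
    | nil =>
      have hc : ¬ (s < nl - 1) := by simp at h; omega
      simp only [pvLetterStep, hx, hc, if_false]
      by_cases hw : wi < nw - 1 <;>
        simp [hw, pvFlatJoin, pvLetterSig, pvJoin_eq, PySem.List.enumerate, List.append_assoc]
    | cons y ys =>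
      have hc : s < nl - 1 := by simp only [List.length_cons] at h; push_cast at h; omega
      have h' : (s + 1) + (((y :: ys).length : Nat) : Int) = nl := by
        simp only [List.length_cons] at h ⊢; push_cast at h ⊢; omega
      rw [show pvLetterStep u nw wi nl sig (s, x)
            = sig ++ pvLetterSig u x ++ [("off", 3 * u)] by
          simp [pvLetterStep, hx, hc, pvLetterSig, pvJoin_eq]]
      rw [ih (s + 1) _ h' (by simp)]
      simp [pvFlatJoin, List.flatMap_cons, List.append_assoc]

-- the word loop of A is B's top-level join
lemma wordLoop (u : Int) (xs : List (List Char)) :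
    ∀ (s : Int) (sig : List (String × Int)), s + (xs.length : Int) = (nw : Int) →
      (PySem.List.enumerate xs s).foldl (pvWordStep u nw) sig
        = sig ++ pvFlatJoin [("off", 7 * u)] (xs.map (pvWordSig u)) := by
  induction xs with
  | nil => intro s sig _; simp [PySem.List.enumerate, pvFlatJoin]
  | cons w rest ih =>
    intro s sig h
    rw [PySem.List.enumerate_cons]
    simp only [List.foldl_cons]
    have hstep : pvWordStep u nw sig (s, w)
        = sig ++ pvFlatJoin [("off", 3 * u)] ((PySem.Chars.splitOn w [' ']).map (pvLetterSig u))
              ++ (if s < nw - 1 then [("off", 7 * u)] else []) := by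
      simp only [pvWordStep]
      exact letterLoop (nl := ((PySem.Chars.splitOn w [' ']).length : Int)) u nw s
        (PySem.Chars.splitOn w [' ']) 0 sig (by simp) (splitOn_ne_nil w [' '])
    cases rest with
    | nil =>
      have hc : ¬ (s < nw - 1) := by simp at h; omega
      simp [PySem.List.enumerate, hstep, hc, pvFlatJoin, pvWordSig, pvJoin_eq]
    | cons y ys =>
      have hc : s < nw - 1 := by simp only [List.length_cons] at h; push_cast at h; omega
      have h' : (s + 1) + (((y :: ys).length : Nat) : Int) = nw := by
        simp only [List.length_cons] at h ⊢; push_cast at h ⊢; omega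
      rw [hstep, ih (s + 1) _ h']
      simp [hc, pvFlatJoin, List.flatMap_cons, pvWordSig, pvJoin_eq, List.append_assoc]

-- ===== VERDICT (by name: the statement is the Claim_ definition above) =====
theorem morse_to_signal_spec : Claim_equal_morse_to_signal := by
  intro morse_code base_unit _
  unfold Spec_morse_to_signal morse_to_signal morse_to_signal_alt
  rw [wordLoop (nw := ((PySem.Chars.splitOn morse_code.toList [' ', '/', ' ']).length : Int))
        base_unit _ 0 [] (by simp), pvJoin_eq]
  simp
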